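-- pv_equiv track=rewrite | github.com/whyj107/CodeWar | 20221219_Where's Waldo.py | find_waldo
-- ===== SOURCE A (Python) =====
-- def find_waldo(crowd):
--     dic = {}
--     for i in range(len(crowd)):
--         for j in range(len(crowd[i])):
--             tmp = crowd[i][j]
--             dic.setdefault(tmp, [])
--             dic[tmp].append((i, j))
--     for k, v in dic.items():
--         if len(v) == 1:
--             return v[0]
-- ===== SOURCE B (Python) =====
-- def find_waldo(crowd):
--     counts = {}
--     for row in crowd:
--         for ch in row:
--             counts[ch] = counts.get(ch, 0) + 1
--     for i, row in enumerate(crowd):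
--         for j, ch in enumerate(row):
--             if counts[ch] == 1:
--                 return (i, j)
-- ===== Notes on version B (the rewrite author's own statement) =====
-- stated objective: simpler
-- what changed: B keeps only a char-to-count table built in one double loop and then re-scans the grid itself in row-major order, returning the first cell whose character's count is 1, instead of A's dict of per-char position lists scanned in dict insertion order.
-- outside the precondition, e.g. on find_waldo([['a', 'a']]): A returns None, B returns None
import Mathlib
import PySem

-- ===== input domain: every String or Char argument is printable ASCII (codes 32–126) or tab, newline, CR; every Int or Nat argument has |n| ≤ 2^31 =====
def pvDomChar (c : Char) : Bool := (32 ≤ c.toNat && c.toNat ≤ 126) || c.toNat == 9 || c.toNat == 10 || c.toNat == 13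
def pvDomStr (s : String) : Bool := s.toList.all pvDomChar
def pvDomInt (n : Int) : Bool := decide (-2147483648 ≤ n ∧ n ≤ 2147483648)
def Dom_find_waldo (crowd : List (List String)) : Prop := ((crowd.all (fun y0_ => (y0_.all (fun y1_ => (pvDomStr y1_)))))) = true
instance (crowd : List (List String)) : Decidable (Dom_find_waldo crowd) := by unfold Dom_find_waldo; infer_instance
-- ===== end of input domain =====

-- B replaces A's dict of per-char position lists (scanned in insertion order) by a
-- char-count table plus a second row-major scan of the grid itself; return values only.


-- ===== PORT A =====
def find_waldo (crowd : List (List String)) : Int × Int :=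
  let dic : PySem.Dict String (List (Int × Int)) :=
    (PySem.List.pyRange 0 (crowd.length : Int) 1).foldl (fun d i =>
      (PySem.List.pyRange 0 ((PySem.List.pyGetD crowd i []).length : Int) 1).foldl (fun d j =>
        let tmp := PySem.List.pyGetD (PySem.List.pyGetD crowd i []) j ""
        let d := d.setdefault tmp []
        d.insert tmp (d.getD tmp [] ++ [(i, j)])) d) PySem.Dict.empty
  -- 'for k, v in dic.items(): if len(v) == 1: return v[0]'; falling off the end is
  -- Python's implicit None, excluded by Pre_ (the .getD default is never reached there)
  (dic.items.findSome? (fun kv =>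
    if kv.2.length == 1 then some (PySem.List.pyGetD kv.2 0 (0, 0)) else none)).getD (0, 0)

-- ===== PORT B =====
def find_waldo_alt (crowd : List (List String)) : Int × Int :=
  let counts : PySem.Dict String Int :=
    crowd.foldl (fun d row => row.foldl (fun d ch => d.insert ch (d.getD ch 0 + 1)) d) PySem.Dict.empty
  -- early-return double loop over enumerate; falling off the end is outside Pre_
  ((PySem.List.enumerate crowd 0).findSome? (fun p =>
    (PySem.List.enumerate p.2 0).findSome? (fun q =>
      if counts.getD q.2 0 == 1 then some (p.1, q.1) else none))).getD (0, 0)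

-- ===== PRECONDITION & SPEC =====
-- Pre_ excludes grids with no character of total count 1: there both Pythons fall off
-- the end and return None, which is not a value of the declared Int × Int result type.
def Pre_find_waldo (crowd : List (List String)) : Prop :=
  (crowd.flatten.any (fun c => crowd.flatten.count c == 1)) = true
instance (crowd : List (List String)) : Decidable (Pre_find_waldo crowd) := by unfold Pre_find_waldo; infer_instance
def pvWitness_find_waldo : List (List String) := [["a", "b"], ["a", "c"]]
def Spec_find_waldo (crowd : List (List String)) (out : Int × Int) : Prop := out = find_waldo_alt crowd
instance (crowd : List (List String)) (out : Int × Int) : Decidable (Spec_find_waldo crowd out) := by unfold Spec_find_waldo; infer_instance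

-- ===== CLAIM (what is proved, stated in full; the proofs are below) =====
def Claim_equal_find_waldo : Prop := ∀ (crowd : List (List String)), Dom_find_waldo crowd → Pre_find_waldo crowd → Spec_find_waldo crowd (find_waldo crowd)

-- ===== LEMMAS AND PROOFS =====

-- the grid flattened in row-major order, each cell paired with its (i, j) position
def pvFlat (crowd : List (List String)) : List ((Int × Int) × String) :=
  (PySem.List.enumerate crowd 0).flatMap (fun p =>
    (PySem.List.enumerate p.2 0).map (fun q => ((p.1, q.1), q.2)))

def pvQ (L : List ((Int × Int) × String)) : String → Bool :=
  fun c => L.countP (fun p => p.2 == c) == 1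

def pvCanon (L : List ((Int × Int) × String)) : Int × Int :=
  ((L.find? (fun p => pvQ L p.2)).map (·.1)).getD (0, 0)

theorem pvFindSome?_if {α β : Type} (l : List α) (q : α → Bool) (g : α → β) :
    l.findSome? (fun x => if q x then some (g x) else none) = (l.find? q).map g := by
  induction l with
  | nil => rfl
  | cons x xs ih => by_cases h : q x <;> simp [h, ih]

theorem pvFindSome?_flatMap {α β γ : Type} (l : List α) (g : α → List β) (f : β → Option γ) :
    (l.flatMap g).findSome? f = l.findSome? (fun x => (g x).findSome? f) := by
  induction l with
  | nil => rfl
  | cons x xs ih =>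
      simp only [List.flatMap_cons, List.findSome?_append, ih, List.findSome?_cons]
      cases List.findSome? f (g x) <;> rfl

theorem pvEnumerate_concat {α : Type} (xs : List α) (x : α) : ∀ (s : Int),
    PySem.List.enumerate (xs ++ [x]) s = PySem.List.enumerate xs s ++ [(s + xs.length, x)] := by
  induction xs with
  | nil => intro s; simp [PySem.List.enumerate_cons, PySem.List.enumerate_nil]
  | cons y ys ih =>
      intro s
      simp [PySem.List.enumerate_cons, ih (s + 1)]
      ring_nf

theorem pvFoldlRangeEnum {α β : Type} (d0 : α) (g : β → Int → α → β) :
    ∀ (xs : List α) (init : β),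
    (PySem.List.pyRange 0 (xs.length : Int) 1).foldl
        (fun acc i => g acc i (PySem.List.pyGetD xs i d0)) init
      = (PySem.List.enumerate xs 0).foldl (fun acc p => g acc p.1 p.2) init := by
  intro xs
  induction xs using List.reverseRecOn with
  | nil => intro init; simp [PySem.List.pyRange_one_eq_nil, PySem.List.enumerate_nil]
  | append_singleton ys y ih =>
      intro init
      have hlen : ((ys ++ [y]).length : Int) = (ys.length : Int) + 1 := by simp
      rw [hlen, PySem.List.pyRange_one_succ_right (by positivity), List.foldl_append,
          pvEnumerate_concat ys y 0, List.foldl_append]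
      have hcongr : (PySem.List.pyRange 0 (ys.length : Int) 1).foldl
            (fun acc i => g acc i (PySem.List.pyGetD (ys ++ [y]) i d0)) init
          = (PySem.List.pyRange 0 (ys.length : Int) 1).foldl
            (fun acc i => g acc i (PySem.List.pyGetD ys i d0)) init := by
        apply PySem.List.foldl_congr_mem
        intro acc i hi
        have hi' := (PySem.List.mem_pyRange_one).1 hi
        have h1 : PySem.List.pyGetD (ys ++ [y]) i d0 = PySem.List.pyGetD ys i d0 := by
          rw [PySem.List.pyGetD_eq_getElem (ys ++ [y]) d0 hi'.1 (by simp; omega),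
              PySem.List.pyGetD_eq_getElem ys d0 hi'.1 hi'.2]
          rw [List.getElem_append_left (by omega)]
        rw [h1]
      rw [hcongr, ih]
      simp only [List.foldl_cons, List.foldl_nil]
      rw [PySem.List.pyGetD_eq_getElem (ys ++ [y]) d0 (by positivity) (by simp)]
      rw [show (0:Int) + ys.length = (ys.length:Int) by omega]
      congr 1
      simp

theorem pvStepA_eq_modify (d : PySem.Dict String (List (Int × Int))) (k : String) (x : Int × Int) :
    ((d.setdefault k []).insert k ((d.setdefault k []).getD k [] ++ [x])) = d.modify k [] (· ++ [x]) := by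
  by_cases h : d.contains k
  · rw [PySem.Dict.setdefault_of_contains d [] h]; rfl
  · rw [PySem.Dict.setdefault_of_not_contains d [] (by simpa using h)]
    rw [PySem.Dict.getD_insert_self, PySem.Dict.insert_insert_self]
    unfold PySem.Dict.modify
    rw [PySem.Dict.getD_of_not_contains d [] (by simpa using h)]

theorem pvFind?_foldl_add {α : Type} [BEq α] [LawfulBEq α] (q : α → Bool) :
    ∀ (l : List α) (s : List α),
    (List.foldl PySem.Set.add s l).find? q
      = ((s.find? q).or ((l.filter (fun x => !s.contains x)).find? q)) := by
  intro l
  induction l with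
  | nil => intro s; simp
  | cons x xs ih =>
      intro s
      simp only [List.foldl_cons, PySem.Set.add]
      by_cases hx : x ∈ s
      · rw [if_pos (by simpa using hx)]
        rw [ih s]
        simp [hx]
      · rw [if_neg (by simpa using hx)]
        rw [ih (s ++ [x]), List.find?_append]
        simp only [List.filter_cons]
        rw [if_pos (by simpa using hx)]
        by_cases hq : q x
        · simp [hq]
        · simp only [List.find?_cons, hq, Option.or_assoc]
          have hfe : List.find? q (xs.filter (fun a => !(s ++ [x]).contains a))
                   = List.find? q (xs.filter (fun a => !s.contains a)) := by
            rw [List.find?_filter, List.find?_filter]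
            have : (fun a => decide ((!(s ++ [x]).contains a) = true ∧ q a = true))
                 = (fun a => decide ((!s.contains a) = true ∧ q a = true)) := by
              funext a
              by_cases ha : a = x
              · subst ha; simp [hq]
              · have hca : (s ++ [x]).contains a = s.contains a := by
                  simp [ha]
                rw [hca]
            rw [this]
          rw [hfe]
          simp

theorem pvCounts_getD (crowd : List (List String)) (c : String) :
    ∀ (d : PySem.Dict String Int),
    (crowd.foldl (fun d row => row.foldl (fun d ch => d.insert ch (d.getD ch 0 + 1)) d) d).getD c 0
      = d.getD c 0 + (crowd.flatten.count c : Int) := by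
  induction crowd with
  | nil => intro d; simp
  | cons row rest ih =>
      intro d
      simp only [List.foldl_cons, ih, PySem.Dict.getD_foldl_insert_add_one, List.flatten_cons,
        List.count_append]
      push_cast; ring

theorem pvMapSnd_flat_aux (crowd : List (List String)) : ∀ (s : Int),
    ((PySem.List.enumerate crowd s).flatMap (fun p =>
      (PySem.List.enumerate p.2 0).map (fun q => ((p.1, q.1), q.2)))).map (·.2) = crowd.flatten := by
  induction crowd with
  | nil => intro s; simp [PySem.List.enumerate_nil]
  | cons row rest ih =>
      intro s
      simp only [PySem.List.enumerate_cons, List.flatMap_cons, List.map_append, ih (s + 1),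
        List.flatten_cons, List.map_map]
      congr 1
      exact PySem.List.map_snd_enumerate row 0

theorem pvMapSnd_flat (crowd : List (List String)) :
    (pvFlat crowd).map (·.2) = crowd.flatten := pvMapSnd_flat_aux crowd 0

-- value extraction: if p0 is the first count-1 cell, the position list of its char is [p0.1]
theorem pvFind_val (L : List ((Int × Int) × String)) (p0 : (Int × Int) × String)
    (h : L.find? (fun p => pvQ L p.2) = some p0) :
    ((L.filter (fun p => p.2 == p0.2)).map (·.1)).getD 0 (0, 0) = p0.1 := by
  have hq : pvQ L p0.2 = true := by simpa using List.find?_some h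
  have hmem : p0 ∈ L := List.mem_of_find?_eq_some h
  have hcount : (L.filter (fun p => p.2 == p0.2)).length = 1 := by
    rw [← List.countP_eq_length_filter]
    simpa [pvQ] using hq
  obtain ⟨a, ha⟩ := List.length_eq_one_iff.1 hcount
  have : p0 ∈ L.filter (fun p => p.2 == p0.2) := by
    rw [List.mem_filter]; exact ⟨hmem, by simp⟩
  rw [ha] at this ⊢
  simp_all

-- ===== A-side characterization =====
theorem pvA_canon (crowd : List (List String)) : find_waldo crowd = pvCanon (pvFlat crowd) := by
  have hdic : ((PySem.List.pyRange 0 (crowd.length : Int) 1).foldl (fun d i =>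
      (PySem.List.pyRange 0 ((PySem.List.pyGetD crowd i []).length : Int) 1).foldl
        (fun (d : PySem.Dict String (List (Int × Int))) j =>
          (d.setdefault (PySem.List.pyGetD (PySem.List.pyGetD crowd i []) j "") []).insert
            (PySem.List.pyGetD (PySem.List.pyGetD crowd i []) j "")
            ((d.setdefault (PySem.List.pyGetD (PySem.List.pyGetD crowd i []) j "") []).getD
              (PySem.List.pyGetD (PySem.List.pyGetD crowd i []) j "") [] ++ [(i, j)])) d)
        PySem.Dict.empty)
      = (pvFlat crowd).foldl (fun d r => d.modify r.2 [] (· ++ [r.1])) PySem.Dict.empty := by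
    rw [pvFoldlRangeEnum ([] : List String)
      (fun (d : PySem.Dict String (List (Int × Int))) i row =>
        (PySem.List.pyRange 0 (row.length : Int) 1).foldl (fun d j =>
          (d.setdefault (PySem.List.pyGetD row j "") []).insert
            (PySem.List.pyGetD row j "")
            ((d.setdefault (PySem.List.pyGetD row j "") []).getD
              (PySem.List.pyGetD row j "") [] ++ [(i, j)])) d) crowd PySem.Dict.empty]
    have h2 : ∀ (acc : PySem.Dict String (List (Int × Int))) (p : Int × List String),
        p ∈ PySem.List.enumerate crowd 0 →
        (PySem.List.pyRange 0 (p.2.length : Int) 1).foldl (fun d j =>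
          (d.setdefault (PySem.List.pyGetD p.2 j "") []).insert
            (PySem.List.pyGetD p.2 j "")
            ((d.setdefault (PySem.List.pyGetD p.2 j "") []).getD
              (PySem.List.pyGetD p.2 j "") [] ++ [(p.1, j)])) acc
        = (PySem.List.enumerate p.2 0).foldl (fun d q =>
            (d.setdefault q.2 []).insert q.2 ((d.setdefault q.2 []).getD q.2 [] ++ [(p.1, q.1)])) acc := by
      intro acc p _
      exact pvFoldlRangeEnum ""
        (fun (d : PySem.Dict String (List (Int × Int))) j ch =>
          (d.setdefault ch []).insert ch ((d.setdefault ch []).getD ch [] ++ [(p.1, j)])) p.2 acc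
    rw [PySem.List.foldl_congr_mem _ _ _ _ h2]
    simp only [pvStepA_eq_modify]
    simp [pvFlat, List.foldl_flatMap, List.foldl_map]
  simp only [find_waldo]
  rw [hdic]
  have hswap : (pvFlat crowd).foldl (fun d r => d.modify r.2 [] (· ++ [r.1])) PySem.Dict.empty
      = ((pvFlat crowd).map (fun r => (r.2, r.1))).foldl
        (fun d q => d.modify q.1 [] (· ++ [q.2])) PySem.Dict.empty := by
    rw [List.foldl_map]
  have hkeys : ((pvFlat crowd).foldl (fun d r => d.modify r.2 [] (· ++ [r.1]))
        PySem.Dict.empty).keys = PySem.Set.update ([] : List String) ((pvFlat crowd).map (·.2)) := by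
    rw [hswap, PySem.Dict.keys_foldl_modify_key ((pvFlat crowd).map (fun r => (r.2, r.1)))
      (fun q => q.1) [] (fun _ q => (· ++ [q.2])) PySem.Dict.empty]
    simp [PySem.Dict.keys_empty, List.map_map, Function.comp_def]
  have hnodup : ((pvFlat crowd).foldl (fun d r => d.modify r.2 [] (· ++ [r.1]))
        PySem.Dict.empty).keys.Nodup := by
    rw [hswap]
    exact PySem.Dict.nodup_keys_foldl_modify_key ((pvFlat crowd).map (fun r => (r.2, r.1)))
      (fun q => q.1) [] (fun _ q => (· ++ [q.2])) PySem.Dict.empty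
      (by simp [PySem.Dict.keys_empty])
  have hgetD : ∀ c, ((pvFlat crowd).foldl (fun d r => d.modify r.2 [] (· ++ [r.1]))
        PySem.Dict.empty).getD c [] = ((pvFlat crowd).filter (fun p => p.2 == c)).map (·.1) := by
    intro c
    rw [hswap, PySem.Dict.getD_foldl_modify_append ((pvFlat crowd).map (fun r => (r.2, r.1)))
      PySem.Dict.empty c]
    simp [List.filter_map, List.map_map, Function.comp_def]
  rw [PySem.Dict.items_eq_map_keys _ hnodup [], List.findSome?_map]
  have hbody : ((fun kv : String × List (Int × Int) =>
        if kv.2.length == 1 then some (PySem.List.pyGetD kv.2 0 (0, 0)) else none) ∘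
        (fun k => (k, ((pvFlat crowd).foldl (fun d r => d.modify r.2 [] (· ++ [r.1]))
          PySem.Dict.empty).getD k [])))
      = (fun k => if pvQ (pvFlat crowd) k then
          some ((((pvFlat crowd).filter (fun p => p.2 == k)).map (·.1)).getD 0 (0, 0)) else none) := by
    funext k
    simp only [Function.comp_apply, hgetD k, PySem.List.pyGetD_zero]
    have hc : ((((pvFlat crowd).filter (fun p => p.2 == k)).map (·.1)).length == 1)
        = pvQ (pvFlat crowd) k := by
      simp [pvQ, List.countP_eq_length_filter]
    rw [hc]
  rw [hbody, pvFindSome?_if]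
  have hfindkeys : (((pvFlat crowd).foldl (fun d r => d.modify r.2 [] (· ++ [r.1]))
        PySem.Dict.empty).keys).find? (pvQ (pvFlat crowd))
      = Option.map (fun p => p.2) ((pvFlat crowd).find? (fun p => pvQ (pvFlat crowd) p.2)) := by
    rw [hkeys]
    show (List.foldl PySem.Set.add [] ((pvFlat crowd).map (·.2))).find? (pvQ (pvFlat crowd)) = _
    rw [pvFind?_foldl_add (pvQ (pvFlat crowd)) ((pvFlat crowd).map (·.2)) []]
    simp only [List.find?_nil, Option.none_or, List.contains_nil, Bool.not_false, List.filter_true]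
    rw [List.find?_map]
    rfl
  rw [hfindkeys]
  cases hf : (pvFlat crowd).find? (fun p => pvQ (pvFlat crowd) p.2) with
  | none => simp [pvCanon, hf]
  | some p0 =>
      simp only [pvCanon, hf, Option.map_some, Option.getD_some]
      exact pvFind_val (pvFlat crowd) p0 hf

-- ===== B-side characterization =====
theorem pvB_canon (crowd : List (List String)) : find_waldo_alt crowd = pvCanon (pvFlat crowd) := by
  simp only [find_waldo_alt]
  have hcond : ∀ c, ((crowd.foldl (fun d row => row.foldl
        (fun d ch => d.insert ch (d.getD ch 0 + 1)) d)
        (PySem.Dict.empty : PySem.Dict String Int)).getD c 0 == 1) = pvQ (pvFlat crowd) c := by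
    intro c
    rw [pvCounts_getD crowd c PySem.Dict.empty]
    have hcnt : crowd.flatten.count c = (pvFlat crowd).countP (fun p => p.2 == c) := by
      rw [← pvMapSnd_flat crowd, List.count_eq_countP, List.countP_map]
      rfl
    simp [pvQ, ← hcnt]
  have hscan : (PySem.List.enumerate crowd 0).findSome? (fun p =>
      (PySem.List.enumerate p.2 0).findSome? (fun q =>
        if (crowd.foldl (fun d row => row.foldl (fun d ch => d.insert ch (d.getD ch 0 + 1)) d)
          (PySem.Dict.empty : PySem.Dict String Int)).getD q.2 0 == 1
        then some (p.1, q.1) else none))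
      = (pvFlat crowd).findSome? (fun r => if pvQ (pvFlat crowd) r.2 then some r.1 else none) := by
    simp only [hcond]
    rw [pvFlat, pvFindSome?_flatMap]
    congr 1
    funext p
    rw [List.findSome?_map]
    rfl
  rw [hscan, pvFindSome?_if]
  rfl


-- ===== VERDICT (by name: the statement is the Claim_ definition above) =====
theorem find_waldo_spec : Claim_equal_find_waldo := by
  intro crowd _ _
  show find_waldo crowd = find_waldo_alt crowd
  rw [pvA_canon, pvB_canon]
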